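-- pv_equiv track=rewrite | github.com/wasdw1012/applet- | incremental_id_hunter.py | _detect_generation_pattern
-- ===== SOURCE A (Python) =====
-- from typing import List, Dict, Set, Optional, Any, Tuple, Union
--
-- def _detect_generation_pattern(numbers: List[int]) -> str:
--     """检测生成模式"""
--     if len(numbers) < 2:
--         return 'insufficient_data'
--
--     numbers = sorted(set(numbers))
--     diffs = [numbers[i+1] - numbers[i] for i in range(len(numbers)-1)]
--
--     if diffs and all(d == 1 for d in diffs):
--         return 'sequential'
--     elif diffs and all(d == diffs[0] for d in diffs):
--         return f'arithmetic_step_{diffs[0]}'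
--     elif max(numbers) - min(numbers) < len(numbers) * 10:
--         return 'dense_random'
--     else:
--         return 'sparse_random'
-- ===== SOURCE B (Python) =====
-- def _detect_generation_pattern(numbers):
--     """Sort-free classification: set + min/max + divisibility (pigeonhole makes sorting unnecessary)."""
--     if len(numbers) < 2:
--         return 'insufficient_data'
--     seen = set(numbers)
--     n = len(seen)
--     lo = min(seen)
--     hi = max(seen)
--     span = hi - lo
--     if n >= 2 and span % (n - 1) == 0:
--         d = span // (n - 1)
--         if all((x - lo) % d == 0 for x in seen):
--             return 'sequential' if d == 1 else f'arithmetic_step_{d}'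
--     return 'dense_random' if span < n * 10 else 'sparse_random'
-- ===== Notes on version B (the rewrite author's own statement) =====
-- stated objective: alternative
-- what changed: B never sorts and builds no diffs list: it classifies via min/max/span over the raw set plus a divisibility test ((x-lo) % (span//(n-1)) == 0 for every distinct x), correct by pigeonhole: n distinct multiples of d in [lo, lo+d*(n-1)] must be exactly the arithmetic progression.
import Mathlib
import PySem

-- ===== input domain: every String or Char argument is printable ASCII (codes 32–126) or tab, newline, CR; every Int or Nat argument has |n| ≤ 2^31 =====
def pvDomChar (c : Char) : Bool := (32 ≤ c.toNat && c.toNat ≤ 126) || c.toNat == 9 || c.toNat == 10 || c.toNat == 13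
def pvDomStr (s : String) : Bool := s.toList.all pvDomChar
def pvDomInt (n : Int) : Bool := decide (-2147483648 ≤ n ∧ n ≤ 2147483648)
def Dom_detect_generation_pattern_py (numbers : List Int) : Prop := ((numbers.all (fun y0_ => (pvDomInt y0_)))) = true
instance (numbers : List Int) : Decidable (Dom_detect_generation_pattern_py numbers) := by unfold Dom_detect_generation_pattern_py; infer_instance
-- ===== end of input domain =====

-- B classifies without sorting and without a diffs list: set + min/max + a divisibility test, correct by pigeonhole (objective: alternative).


-- ===== PORT A =====
def detect_generation_pattern_py (numbers : List Int) : String :=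
  if numbers.length < 2 then "insufficient_data" else
  let nums := PySem.List.sorted (PySem.Set.ofList numbers) (fun x => x) false
  let diffs := (PySem.List.pyRange 0 (PySem.List.len nums - 1) 1).map
      (fun i => PySem.List.pyGetD nums (i+1) 0 - PySem.List.pyGetD nums i 0)
  if (!diffs.isEmpty) && diffs.all (fun d => d == 1) then "sequential"
  else if (!diffs.isEmpty) && diffs.all (fun d => d == PySem.List.pyGetD diffs 0 0) then
    "arithmetic_step_" ++ PySem.Int.toStr (PySem.List.pyGetD diffs 0 0)
  else if ((PySem.List.max? nums (fun x => x)).getD 0 - (PySem.List.min? nums (fun x => x)).getD 0)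
          < PySem.List.len nums * 10 then "dense_random"
  else "sparse_random"

-- ===== PORT B =====
def detect_generation_pattern_py_alt (numbers : List Int) : String :=
  if numbers.length < 2 then "insufficient_data" else
  let seen := PySem.Set.ofList numbers
  let n : Int := PySem.List.len seen
  let lo := (PySem.List.min? seen (fun x => x)).getD 0
  let hi := (PySem.List.max? seen (fun x => x)).getD 0
  let span := hi - lo
  if (2 ≤ n) && (PySem.Int.mod span (n - 1) == 0) then
    let d := PySem.Int.floordiv span (n - 1)
    if seen.all (fun x => PySem.Int.mod (x - lo) d == 0) then
      if d == 1 then "sequential" else "arithmetic_step_" ++ PySem.Int.toStr d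
    else if span < n * 10 then "dense_random" else "sparse_random"
  else if span < n * 10 then "dense_random" else "sparse_random"

-- ===== PRECONDITION & SPEC =====
def Spec_detect_generation_pattern_py (numbers : List Int) (out : String) : Prop := out = detect_generation_pattern_py_alt numbers
instance (numbers : List Int) (out : String) : Decidable (Spec_detect_generation_pattern_py numbers out) := by unfold Spec_detect_generation_pattern_py; infer_instance

-- ===== CLAIM (what is proved, stated in full; the proofs are below) =====
def Claim_equal_detect_generation_pattern_py : Prop := ∀ (numbers : List Int), Dom_detect_generation_pattern_py numbers → Spec_detect_generation_pattern_py numbers (detect_generation_pattern_py numbers)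

-- ===== LEMMAS AND PROOFS =====

-- in a list whose consecutive elements grow by at least d, positions i ≤ j differ by at least d*(j-i)
lemma pv_gapd (s : List Int) (d : Int)
    (h : ∀ k : Nat, k + 1 < s.length → s.getD k 0 + d ≤ s.getD (k+1) 0) :
    ∀ i j : Nat, i ≤ j → j < s.length → s.getD i 0 + d * ((j - i : Nat) : Int) ≤ s.getD j 0 := by
  intro i j
  induction j with
  | zero =>
    intro hij hj
    have : i = 0 := by omega
    subst this; simp
  | succ j ih =>
    intro hij hj
    by_cases hle : i ≤ j
    · have h1 := ih hle (by omega)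
      have h2 := h j hj
      have h3 : ((j + 1 - i : Nat) : Int) = ((j - i : Nat) : Int) + 1 := by omega
      rw [h3]; nlinarith
    · have : i = j + 1 := by omega
      subst this; simp

-- constant successive difference d ↔ closed form getD i = getD 0 + i * d
lemma pv_step_char (s : List Int) (d : Int) :
    (∀ k : Nat, k + 1 < s.length → s.getD (k+1) 0 = s.getD k 0 + d) ↔
    (∀ i : Nat, i < s.length → s.getD i 0 = s.getD 0 0 + (i : Int) * d) := by
  constructor
  · intro h i
    induction i with
    | zero => intro _; simp
    | succ i ih =>
      intro hi
      rw [h i hi, ih (by omega)]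
      push_cast
      ring
  · intro h k hk
    rw [h (k+1) hk, h k (by omega)]
    push_cast
    ring

lemma pv_diffs_eq (s : List Int) :
    (PySem.List.pyRange 0 ((s.length : Int) - 1) 1).map
      (fun i => PySem.List.pyGetD s (i+1) 0 - PySem.List.pyGetD s i 0)
    = (List.range (s.length - 1)).map (fun k => s.getD (k+1) 0 - s.getD k 0) := by
  rw [PySem.List.pyRange_one, List.map_map]
  have h1 : (((s.length : Int) - 1 - 0 : Int)).toNat = s.length - 1 := by omega
  rw [h1]
  apply List.map_congr_left
  intro k hk
  have e1 : ((k : Int) + 1) = ((k + 1 : Nat) : Int) := by push_cast; ring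
  simp only [Function.comp_apply, zero_add, e1, PySem.List.pyGetD_natCast]

-- the value of min over any list with the same members as the sorted list t is t's head
lemma pv_min_perm (seen t : List Int) (hperm : t.Perm seen) (hp : t.Pairwise (· ≤ ·)) (hne : t ≠ []) :
    (PySem.List.min? seen (fun x => x)).getD 0 = t.getD 0 0 := by
  have hsne : seen ≠ [] := by
    intro h; subst h; exact hne (List.Perm.eq_nil hperm)
  obtain ⟨m, hm⟩ : ∃ m, PySem.List.min? seen (fun x => x) = some m := by
    cases hmm : PySem.List.min? seen (fun x => x) with
    | none => exact absurd ((PySem.List.min?_eq_none_iff _ _).mp hmm) hsne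
    | some m => exact ⟨m, rfl⟩
  have hmem : m ∈ seen := PySem.List.min?_mem hm
  have hmin : ∀ y ∈ seen, m ≤ y := fun y hy => PySem.List.min?_isMin hm y hy
  have h0mem : t.getD 0 0 ∈ t := by
    rw [List.getD_eq_getElem _ _ (List.length_pos_of_ne_nil hne)]
    exact List.getElem_mem _
  have h1 : m ≤ t.getD 0 0 := hmin _ (hperm.mem_iff.mp h0mem)
  have h2 : t.getD 0 0 ≤ m := by
    have hmt : m ∈ t := hperm.mem_iff.mpr hmem
    obtain ⟨i, hi, rfl⟩ := List.mem_iff_getElem.mp hmt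
    rw [List.getD_eq_getElem _ _ (List.length_pos_of_ne_nil hne)]
    rcases Nat.eq_zero_or_pos i with h | h
    · subst h; rfl
    · exact (List.pairwise_iff_getElem.mp hp) 0 i (List.length_pos_of_ne_nil hne) hi h
  rw [hm]; simp only [Option.getD_some]; exact le_antisymm h1 h2

-- the value of max over any list with the same members as the sorted list t is t's last element
lemma pv_max_perm (seen t : List Int) (hperm : t.Perm seen) (hp : t.Pairwise (· ≤ ·)) (hne : t ≠ []) :
    (PySem.List.max? seen (fun x => x)).getD 0 = t.getD (t.length - 1) 0 := by
  have hsne : seen ≠ [] := by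
    intro h; subst h; exact hne (List.Perm.eq_nil hperm)
  obtain ⟨m, hm⟩ : ∃ m, PySem.List.max? seen (fun x => x) = some m := by
    cases hmm : PySem.List.max? seen (fun x => x) with
    | none => exact absurd ((PySem.List.max?_eq_none_iff _ _).mp hmm) hsne
    | some m => exact ⟨m, rfl⟩
  have hmem : m ∈ seen := PySem.List.max?_mem hm
  have hmax : ∀ y ∈ seen, y ≤ m := fun y hy => PySem.List.max?_isMax hm y hy
  have hlt : t.length - 1 < t.length := by
    have := List.length_pos_of_ne_nil hne; omega
  have hLmem : t.getD (t.length - 1) 0 ∈ t := by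
    rw [List.getD_eq_getElem _ _ hlt]; exact List.getElem_mem _
  have h1 : t.getD (t.length - 1) 0 ≤ m := hmax _ (hperm.mem_iff.mp hLmem)
  have h2 : m ≤ t.getD (t.length - 1) 0 := by
    have hmt : m ∈ t := hperm.mem_iff.mpr hmem
    obtain ⟨i, hi, rfl⟩ := List.mem_iff_getElem.mp hmt
    rw [List.getD_eq_getElem _ _ hlt]
    rcases Nat.lt_or_ge i (t.length - 1) with h | h
    · exact (List.pairwise_iff_getElem.mp hp) i (t.length - 1) hi hlt h
    · have : i = t.length - 1 := by omega
      subst this; rfl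
  rw [hm]; simp only [Option.getD_some]; exact le_antisymm h2 h1


-- the bodies of the two ports, A's on the sorted distinct list t, B's on the unsorted distinct list seen, agree
lemma pv_core (seen t : List Int) (hperm : t.Perm seen) (hp : t.Pairwise (· < ·)) (hne : t ≠ []) :
    (let diffs := (PySem.List.pyRange 0 (PySem.List.len t - 1) 1).map
        (fun i => PySem.List.pyGetD t (i+1) 0 - PySem.List.pyGetD t i 0)
     if (!diffs.isEmpty) && diffs.all (fun d => d == 1) then "sequential"
     else if (!diffs.isEmpty) && diffs.all (fun d => d == PySem.List.pyGetD diffs 0 0) then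
       "arithmetic_step_" ++ PySem.Int.toStr (PySem.List.pyGetD diffs 0 0)
     else if ((PySem.List.max? t (fun x => x)).getD 0 - (PySem.List.min? t (fun x => x)).getD 0)
             < PySem.List.len t * 10 then "dense_random"
     else "sparse_random")
    =
    (let n : Int := PySem.List.len seen
     let lo := (PySem.List.min? seen (fun x => x)).getD 0
     let hi := (PySem.List.max? seen (fun x => x)).getD 0
     let span := hi - lo
     if (2 ≤ n) && (PySem.Int.mod span (n - 1) == 0) then
       let d := PySem.Int.floordiv span (n - 1)
       if seen.all (fun x => PySem.Int.mod (x - lo) d == 0) then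
         if d == 1 then "sequential" else "arithmetic_step_" ++ PySem.Int.toStr d
       else if span < n * 10 then "dense_random" else "sparse_random"
     else if span < n * 10 then "dense_random" else "sparse_random") := by
  have hple : t.Pairwise (· ≤ ·) := hp.imp (fun h => le_of_lt h)
  have hlen0 : 0 < t.length := List.length_pos_of_ne_nil hne
  have hlenEq : seen.length = t.length := (hperm.length_eq).symm
  have hlo : (PySem.List.min? seen (fun x => x)).getD 0 = t.getD 0 0 :=
    pv_min_perm seen t hperm hple hne
  have hhi : (PySem.List.max? seen (fun x => x)).getD 0 = t.getD (t.length - 1) 0 :=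
    pv_max_perm seen t hperm hple hne
  have hlo' : (PySem.List.min? t (fun x => x)).getD 0 = t.getD 0 0 :=
    pv_min_perm t t (List.Perm.refl t) hple hne
  have hhi' : (PySem.List.max? t (fun x => x)).getD 0 = t.getD (t.length - 1) 0 :=
    pv_max_perm t t (List.Perm.refl t) hple hne
  have hlt_getD : ∀ i j : Nat, i < j → j < t.length → t.getD i 0 < t.getD j 0 := by
    intro i j hij hj
    rw [List.getD_eq_getElem _ _ (by omega), List.getD_eq_getElem _ _ hj]
    exact (List.pairwise_iff_getElem.mp hp) i j (by omega) hj hij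
  have hmem_getD : ∀ i : Nat, i < t.length → t.getD i 0 ∈ t := by
    intro i hi
    rw [List.getD_eq_getElem _ _ hi]
    exact List.getElem_mem _
  simp only [PySem.List.len_eq, pv_diffs_eq, hlo, hhi, hlo', hhi', hlenEq]
  by_cases h2 : 2 ≤ t.length
  · -- main case: at least two distinct values
    have hN2 : (2:Int) ≤ (t.length : Int) := by exact_mod_cast h2
    have hnm1pos : (0:Int) < (t.length : Int) - 1 := by omega
    have hc1 : (0:Int) < t.getD 1 0 - t.getD 0 0 := by
      have := hlt_getD 0 1 (by omega) (by omega); omega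
    -- span is at least n-1 (strictly increasing integers)
    have hstep1 : ∀ k : Nat, k + 1 < t.length → t.getD k 0 + 1 ≤ t.getD (k+1) 0 := by
      intro k hk; have := hlt_getD k (k+1) (by omega) hk; omega
    have hspan_ge : t.getD 0 0 + ((t.length : Int) - 1) ≤ t.getD (t.length - 1) 0 := by
      have := pv_gapd t 1 hstep1 0 (t.length - 1) (by omega) (by omega)
      have hc : ((t.length - 1 - 0 : Nat) : Int) = (t.length : Int) - 1 := by omega
      rw [hc] at this; omega
    -- abbreviations
    set lo := t.getD 0 0 with hlodef
    set hi := t.getD (t.length - 1) 0 with hhidef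
    set c := t.getD 1 0 - t.getD 0 0 with hcdef
    by_cases hP : ∀ k : Nat, k + 1 < t.length → t.getD (k+1) 0 = t.getD k 0 + c
    · -- the distinct values form an arithmetic progression with step c
      have hclosed := (pv_step_char t c).mp hP
      have hspan : hi - lo = ((t.length : Int) - 1) * c := by
        have h := hclosed (t.length - 1) (by omega)
        have hcast : ((t.length - 1 : Nat) : Int) = (t.length : Int) - 1 := by omega
        rw [hcast] at h
        simp only [hhidef, hlodef]
        rw [h]; ring
      have hmod : PySem.Int.mod (hi - lo) ((t.length : Int) - 1) = 0 := by
        rw [PySem.Int.mod_eq_emod_of_pos hnm1pos, hspan]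
        exact Int.mul_emod_right _ _
      have hd : PySem.Int.floordiv (hi - lo) ((t.length : Int) - 1) = c := by
        rw [PySem.Int.floordiv_eq_ediv_of_pos hnm1pos, hspan]
        exact Int.mul_ediv_cancel_left _ (by omega)
      have hall : ∀ x ∈ seen, PySem.Int.mod (x - lo) c = 0 := by
        intro x hx
        obtain ⟨i, hi2, rfl⟩ := List.mem_iff_getElem.mp (hperm.mem_iff.mpr hx)
        rw [PySem.Int.mod_eq_emod_of_pos hc1]
        have h := hclosed i hi2
        rw [List.getD_eq_getElem _ _ hi2] at h
        have he : t.getD 0 0 + (i:Int) * c - lo = (i:Int) * c := by rw [hlodef]; ring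
        rw [h, he]
        simp
      have hBout : ((2 ≤ (t.length : Int) : Bool) &&
          (PySem.Int.mod (hi - lo) ((t.length : Int) - 1) == 0)) = true := by
        simp [hmod, hN2]
      have hBall : (seen.all (fun x =>
          PySem.Int.mod (x - lo) (PySem.Int.floordiv (hi - lo) ((t.length : Int) - 1)) == 0)) = true := by
        rw [hd]
        simp only [List.all_eq_true, beq_iff_eq]
        exact fun x hx => hall x hx
      rw [hBout]
      simp only [if_true]
      rw [hBall]
      simp only [if_true, hd]
      have hD : (List.range (t.length - 1)).map (fun k => t.getD (k+1) 0 - t.getD k 0)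
          = (t.getD 1 0 - t.getD 0 0) ::
            ((List.range (t.length - 2)).map (fun k => t.getD (k+2) 0 - t.getD (k+1) 0)) := by
        have h3 : t.length - 1 = (t.length - 2) + 1 := by omega
        rw [h3, List.range_succ_eq_map, List.map_cons, List.map_map]
        rfl
      have hget0 : PySem.List.pyGetD ((List.range (t.length - 1)).map
          (fun k => t.getD (k+1) 0 - t.getD k 0)) 0 0 = c := by
        rw [hD, PySem.List.pyGetD_zero_cons, ← hcdef]
      by_cases hc : c = 1
      · have hA1 : ((!((List.range (t.length - 1)).map (fun k => t.getD (k+1) 0 - t.getD k 0)).isEmpty)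
            && ((List.range (t.length - 1)).map (fun k => t.getD (k+1) 0 - t.getD k 0)).all
               (fun d => d == 1)) = true := by
          simp only [Bool.and_eq_true, Bool.not_eq_eq_eq_not, Bool.not_true,
            List.isEmpty_eq_false_iff, List.all_eq_true, List.mem_map, List.mem_range, beq_iff_eq,
            forall_exists_index, and_imp, ne_eq, List.map_eq_nil_iff, List.range_eq_nil]
          refine ⟨by omega, ?_⟩
          rintro d k hk rfl
          have := hP k (by omega)
          omega
        rw [hA1]
        simp [hc]
      · have hA1 : ((!((List.range (t.length - 1)).map (fun k => t.getD (k+1) 0 - t.getD k 0)).isEmpty)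
            && ((List.range (t.length - 1)).map (fun k => t.getD (k+1) 0 - t.getD k 0)).all
               (fun d => d == 1)) = false := by
          apply Bool.eq_false_iff.mpr
          simp only [Bool.and_eq_true, Bool.not_eq_eq_eq_not, Bool.not_true,
            List.isEmpty_eq_false_iff, List.all_eq_true, List.mem_map, List.mem_range, beq_iff_eq,
            forall_exists_index, and_imp, ne_eq, List.map_eq_nil_iff, List.range_eq_nil]
          rintro ⟨-, hall1⟩
          have h0 : t.getD 1 0 - t.getD 0 0 = 1 := hall1 _ 0 (by omega) rfl
          omega
        have hA2 : ((!((List.range (t.length - 1)).map (fun k => t.getD (k+1) 0 - t.getD k 0)).isEmpty)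
            && ((List.range (t.length - 1)).map (fun k => t.getD (k+1) 0 - t.getD k 0)).all
               (fun d => d == PySem.List.pyGetD ((List.range (t.length - 1)).map
                 (fun k => t.getD (k+1) 0 - t.getD k 0)) 0 0)) = true := by
          rw [hget0]
          simp only [Bool.and_eq_true, Bool.not_eq_eq_eq_not, Bool.not_true,
            List.isEmpty_eq_false_iff, List.all_eq_true, List.mem_map, List.mem_range, beq_iff_eq,
            forall_exists_index, and_imp, ne_eq, List.map_eq_nil_iff, List.range_eq_nil]
          refine ⟨by omega, ?_⟩
          rintro d k hk rfl
          have := hP k (by omega)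
          omega
        rw [hA1, hA2, hget0]
        simp [hc]
    · -- no common step: both sides fall through to the density test
      have hget0 : PySem.List.pyGetD ((List.range (t.length - 1)).map
          (fun k => t.getD (k+1) 0 - t.getD k 0)) 0 0 = c := by
        have hD : (List.range (t.length - 1)).map (fun k => t.getD (k+1) 0 - t.getD k 0)
            = (t.getD 1 0 - t.getD 0 0) ::
              ((List.range (t.length - 2)).map (fun k => t.getD (k+2) 0 - t.getD (k+1) 0)) := by
          have h3 : t.length - 1 = (t.length - 2) + 1 := by omega
          rw [h3, List.range_succ_eq_map, List.map_cons, List.map_map]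
          rfl
        rw [hD, PySem.List.pyGetD_zero_cons, ← hcdef]
      have hA1 : ((!((List.range (t.length - 1)).map (fun k => t.getD (k+1) 0 - t.getD k 0)).isEmpty)
          && ((List.range (t.length - 1)).map (fun k => t.getD (k+1) 0 - t.getD k 0)).all
             (fun d => d == 1)) = false := by
        apply Bool.eq_false_iff.mpr
        simp only [Bool.and_eq_true, Bool.not_eq_eq_eq_not, Bool.not_true,
          List.isEmpty_eq_false_iff, List.all_eq_true, List.mem_map, List.mem_range, beq_iff_eq,
          forall_exists_index, and_imp, ne_eq, List.map_eq_nil_iff, List.range_eq_nil]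
        rintro ⟨-, hall1⟩
        apply hP
        intro k hk
        have h1 := hall1 _ k (by omega) rfl
        have h0 : t.getD 1 0 - t.getD 0 0 = 1 := hall1 _ 0 (by omega) rfl
        omega
      have hA2 : ((!((List.range (t.length - 1)).map (fun k => t.getD (k+1) 0 - t.getD k 0)).isEmpty)
          && ((List.range (t.length - 1)).map (fun k => t.getD (k+1) 0 - t.getD k 0)).all
             (fun d => d == PySem.List.pyGetD ((List.range (t.length - 1)).map
               (fun k => t.getD (k+1) 0 - t.getD k 0)) 0 0)) = false := by
        apply Bool.eq_false_iff.mpr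
        rw [hget0]
        simp only [Bool.and_eq_true, Bool.not_eq_eq_eq_not, Bool.not_true,
          List.isEmpty_eq_false_iff, List.all_eq_true, List.mem_map, List.mem_range, beq_iff_eq,
          forall_exists_index, and_imp, ne_eq, List.map_eq_nil_iff, List.range_eq_nil]
        rintro ⟨-, hall1⟩
        apply hP
        intro k hk
        have h1 := hall1 _ k (by omega) rfl
        omega
      -- if B's divisibility test passed in full, the values would form an AP after all
      have hback : ¬ (PySem.Int.mod (hi - lo) ((t.length : Int) - 1) = 0 ∧
          ∀ x ∈ seen, PySem.Int.mod (x - lo)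
            (PySem.Int.floordiv (hi - lo) ((t.length : Int) - 1)) = 0) := by
        rintro ⟨hmod, hall⟩
        set d := PySem.Int.floordiv (hi - lo) ((t.length : Int) - 1) with hddef
        have hspan_eq : d * ((t.length : Int) - 1) = hi - lo := by
          have h := PySem.Int.floordiv_mul_add_mod (hi - lo) ((t.length : Int) - 1)
          rw [hmod] at h
          rw [← hddef] at h
          linarith
        have hdpos : 0 < d := by nlinarith [hspan_ge]
        have hdvd : ∀ i : Nat, i < t.length → d ∣ (t.getD i 0 - lo) := by
          intro i hi3
          have hx : t.getD i 0 ∈ seen := hperm.mem_iff.mp (hmem_getD i hi3)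
          have h := hall _ hx
          rw [PySem.Int.mod_eq_emod_of_pos hdpos] at h
          exact Int.dvd_of_emod_eq_zero h
        have hcons_ge : ∀ k : Nat, k + 1 < t.length → t.getD k 0 + d ≤ t.getD (k+1) 0 := by
          intro k hk
          have h1 := hdvd k (by omega)
          have h2 := hdvd (k+1) hk
          have h3 : d ∣ (t.getD (k+1) 0 - t.getD k 0) := by
            have := dvd_sub h2 h1
            simpa using this
          have h4 : 0 < t.getD (k+1) 0 - t.getD k 0 := by
            have := hlt_getD k (k+1) (by omega) hk; omega
          have := Int.le_of_dvd h4 h3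
          omega
        have hgap := pv_gapd t d hcons_ge
        have hPd : ∀ k : Nat, k + 1 < t.length → t.getD (k+1) 0 = t.getD k 0 + d := by
          intro k hk
          have g1 := hgap 0 k (by omega) (by omega)
          have g2 := hgap (k+1) (t.length - 1) (by omega) (by omega)
          have c1 : ((k - 0 : Nat) : Int) = (k : Int) := by omega
          have c2 : ((t.length - 1 - (k+1) : Nat) : Int) = (t.length : Int) - 2 - (k : Int) := by omega
          rw [c1] at g1
          rw [c2] at g2
          have hcge := hcons_ge k hk
          have e1 : d * ((t.length : Int) - 2 - (k : Int)) + d * (k : Int)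
              = d * ((t.length : Int) - 2) := by ring
          have e2 : d * ((t.length : Int) - 1) - d * ((t.length : Int) - 2) = d := by ring
          linarith
        apply hP
        intro k hk
        have hcd : c = d := by
          have h01 : t.getD 1 0 = t.getD 0 0 + d := hPd 0 (by omega)
          omega
        rw [hPd k hk, hcd]
      rw [hA1, hA2]
      by_cases hm : PySem.Int.mod (hi - lo) ((t.length : Int) - 1) = 0
      · have hBall : (seen.all (fun x => PySem.Int.mod (x - lo)
            (PySem.Int.floordiv (hi - lo) ((t.length : Int) - 1)) == 0)) = false := by
          apply Bool.eq_false_iff.mpr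
          intro hallb
          apply hback
          refine ⟨hm, ?_⟩
          intro x hx
          have h := List.all_eq_true.mp hallb x hx
          simpa using h
        have hBout : ((2 ≤ ((t.length : Int)) : Bool) &&
            (PySem.Int.mod (hi - lo) ((t.length : Int) - 1) == 0)) = true := by
          simp [hm, hN2]
        rw [hBout, hBall]
        simp
      · have hBout : ((2 ≤ ((t.length : Int)) : Bool) &&
            (PySem.Int.mod (hi - lo) ((t.length : Int) - 1) == 0)) = false := by
          simp [hm]
        rw [hBout]
        simp
  · -- only one distinct value: both sides fall through to "dense_random"
    obtain ⟨a, rfl⟩ : ∃ a, t = [a] := by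
      cases t with
      | nil => exact absurd rfl hne
      | cons a u =>
        cases u with
        | nil => exact ⟨a, rfl⟩
        | cons b v => simp at h2
    have hseen : seen = [a] := (List.singleton_perm.mp hperm).symm
    subst hseen
    norm_num

-- ===== VERDICT (by name: the statement is the Claim_ definition above) =====
theorem detect_generation_pattern_py_spec : Claim_equal_detect_generation_pattern_py := by
  intro numbers _
  unfold Spec_detect_generation_pattern_py detect_generation_pattern_py detect_generation_pattern_py_alt
  by_cases hlen : numbers.length < 2
  · rw [if_pos hlen, if_pos hlen]
  · rw [if_neg hlen, if_neg hlen]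
    have hnum : numbers ≠ [] := by intro h; subst h; simp at hlen
    have hp : (PySem.List.sorted (PySem.Set.ofList numbers) (fun x => x) false).Pairwise (· < ·) :=
      PySem.List.sorted_ofList_pairwise_lt numbers
    have hperm : (PySem.List.sorted (PySem.Set.ofList numbers) (fun x => x) false).Perm
        (PySem.Set.ofList numbers) := PySem.List.sorted_perm _ _ _
    have hne : PySem.List.sorted (PySem.Set.ofList numbers) (fun x => x) false ≠ [] := by
      intro h
      cases hn : numbers with
      | nil => exact hnum hn
      | cons a t =>
        have ha : a ∈ PySem.Set.ofList numbers := by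
          rw [PySem.Set.mem_ofList]; rw [hn]; simp
        have h0 : PySem.Set.ofList numbers = [] := by
          by_contra h0
          have := PySem.List.sorted_eq_nil_iff (PySem.Set.ofList numbers) (fun x => x) false
          rw [this] at h
          exact h0 h
        rw [h0] at ha; simp at ha
    exact pv_core _ _ hperm hp hne
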